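-- pv_equiv track=rewrite | github.com/jma96x/AdventCode2023 | Day1/main.py | part2
-- ===== SOURCE A (Python) =====
-- def part2(rounds):
--     """Solve part 2."""
--     numbers = {"one" : 1, "two" : 2, "three" : 3, "four" : 4, "five" : 5, "six" : 6, "seven" : 7, "eight" : 8, "nine" : 9,
--                "1" : 1, "2" : 2, "3" : 3, "4" : 4, "5" : 5, "6" : 6, "7" : 7, "8" : 8, "9" : 9
--                }
--
--     sum = 0
--     for round, count in rounds.items():
--         first_indexs = {}
--         last_indexs = {}
--         for number in numbers:
--             first_indexs[number] = round.find(number)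
--             last_indexs[number] = round.rfind(number)
--
--         # Eliminar las claves cuyo valor es -1
--         first_indexs_1 = {clave: valor for clave, valor in first_indexs.items() if valor != -1}
--         #
--         index_min_value = min(first_indexs_1, key=first_indexs_1.get)
--         #
--         index_max_value = max(last_indexs, key=last_indexs.get)
--
--         sum += int(str(numbers[index_min_value])+str(numbers[index_max_value]))
--
--     return sum
-- ===== SOURCE B (Python) =====
-- def part2(rounds):
--     """Solve part 2: single left-to-right scan per line tracking first/last number."""
--     words = (("one", 1), ("two", 2), ("three", 3), ("four", 4), ("five", 5),
--              ("six", 6), ("seven", 7), ("eight", 8), ("nine", 9),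
--              ("1", 1), ("2", 2), ("3", 3), ("4", 4), ("5", 5),
--              ("6", 6), ("7", 7), ("8", 8), ("9", 9))
--     total = 0
--     for line in rounds:  # dict iteration: keys in insertion order
--         first = None
--         last = None
--         for i in range(len(line)):
--             v = next((val for w, val in words if line.startswith(w, i)), None)
--             if v is not None:
--                 if first is None:
--                     first = v
--                 last = v
--         if first is None:
--             raise ValueError(line)  # matches A's min() over an empty dict
--         total += first * 10 + last
--     return total
-- ===== Notes on version B (the rewrite author's own statement) =====
-- stated objective: alternative
-- what changed: A builds two 18-entry dicts of str.find/str.rfind results per line and takes min/max over them; B makes one left-to-right scan over the line's positions, keeping a running first/last matched number.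
import Mathlib
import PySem

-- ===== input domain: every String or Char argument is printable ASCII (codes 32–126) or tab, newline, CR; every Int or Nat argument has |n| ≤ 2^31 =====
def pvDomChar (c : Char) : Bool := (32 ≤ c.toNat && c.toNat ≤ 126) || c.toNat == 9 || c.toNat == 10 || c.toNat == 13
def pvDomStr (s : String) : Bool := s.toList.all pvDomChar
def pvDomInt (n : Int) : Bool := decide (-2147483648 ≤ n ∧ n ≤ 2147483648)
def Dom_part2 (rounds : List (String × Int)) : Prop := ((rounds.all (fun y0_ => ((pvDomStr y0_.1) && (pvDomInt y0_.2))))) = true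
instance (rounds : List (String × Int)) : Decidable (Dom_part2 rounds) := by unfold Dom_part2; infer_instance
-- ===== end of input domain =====

-- B is an alternative one-pass scan per line (first/last running match) replacing A's
-- two 18-entry find/rfind tables with min/max; equivalence is about the return value.

-- ===== PORT A =====
-- the literal `numbers` table of A (also the pattern table of B)
def numberWords : List (String × Int) :=
  [("one", 1), ("two", 2), ("three", 3), ("four", 4), ("five", 5),
   ("six", 6), ("seven", 7), ("eight", 8), ("nine", 9),
   ("1", 1), ("2", 2), ("3", 3), ("4", 4), ("5", 5),
   ("6", 6), ("7", 7), ("8", 8), ("9", 9)]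

-- one iteration of A's `for round, count in rounds.items()` body
def part2LineA (s : String) : Int :=
  let first_indexs := numberWords.map (fun p => (p.1, PySem.Str.find s p.1))
  let last_indexs := numberWords.map (fun p => (p.1, PySem.Str.rfind s p.1))
  let first_indexs_1 := first_indexs.filter (fun kv => kv.2 != -1)
  match PySem.List.min? first_indexs_1 (fun kv => kv.2),
        PySem.List.max? last_indexs (fun kv => kv.2) with
  | some mn, some mx =>
      (PySem.Int.ofStr? (PySem.Int.toStr ((numberWords.lookup mn.1).getD 0)
        ++ PySem.Int.toStr ((numberWords.lookup mx.1).getD 0))).getD 0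
  | _, _ => 0  -- Python A raises ValueError here (min of an empty dict); excluded by Pre_

-- rounds is a dict: iterate its keys (first-occurrence order); `count` is unused
def part2 (rounds : List (String × Int)) : Int :=
  (PySem.List.dedup (rounds.map Prod.fst)).foldl (fun sum s => sum + part2LineA s) 0

-- ===== PORT B =====
-- the number (if any) spelled or written at the start of cs
def matchAt (cs : List Char) : Option Int :=
  numberWords.findSome? (fun p => if p.1.toList.isPrefixOf cs then some p.2 else none)

-- B's inner loop: one pass over the positions, tracking first/last seen number
def scanB : List Char → Option Int → Option Int → Option (Int × Int)
  | [], first?, last? =>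
      match first?, last? with
      | some f, some l => some (f, l)
      | _, _ => none
  | c :: rest, first?, last? =>
      match matchAt (c :: rest) with
      | some v => scanB rest (some (first?.getD v)) (some v)
      | none => scanB rest first? last?

def part2LineB (s : String) : Int :=
  match scanB s.toList none none with
  | some (f, l) => f * 10 + l
  | none => 0  -- Python B raises ValueError here; excluded by Pre_

def part2_alt (rounds : List (String × Int)) : Int :=
  (PySem.List.dedup (rounds.map Prod.fst)).foldl (fun total s => total + part2LineB s) 0

-- ===== PRECONDITION & SPEC =====
-- Pre_ excludes exactly the inputs where some line contains no digit 1-9 nor spelled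
-- number: there Python A raises ValueError (min() of an empty dict), and so does B.
def Pre_part2 (rounds : List (String × Int)) : Prop :=
  (rounds.all (fun p => numberWords.any (fun q => PySem.Str.isIn q.1 p.1))) = true
instance (rounds : List (String × Int)) : Decidable (Pre_part2 rounds) := by unfold Pre_part2; infer_instance

def pvWitness_part2 : (List (String × Int)) := [("two1nine", 1), ("xtwone3four", 2)]

def Spec_part2 (rounds : List (String × Int)) (out : Int) : Prop := out = part2_alt rounds
instance (rounds : List (String × Int)) (out : Int) : Decidable (Spec_part2 rounds out) := by unfold Spec_part2; infer_instance

-- ===== CLAIM (what is proved, stated in full; the proofs are below) =====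
def Claim_equal_part2 : Prop := ∀ (rounds : List (String × Int)), Dom_part2 rounds → Pre_part2 rounds → Spec_part2 rounds (part2 rounds)

-- ===== LEMMAS AND PROOFS =====

-- decidable facts about the literal pattern table
theorem words_prefix_unique : ∀ p ∈ numberWords, ∀ q ∈ numberWords, p.1.toList <+: q.1.toList → p = q := by decide

theorem words_lookup : ∀ p ∈ numberWords, numberWords.lookup p.1 = some p.2 := by decide

theorem words_val_range : ∀ p ∈ numberWords, 1 ≤ p.2 ∧ p.2 ≤ 9 := by decide

theorem words_ne_nil : ∀ p ∈ numberWords, p.1.toList ≠ [] := by decide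

theorem matchAt_nil : matchAt [] = none := by decide

theorem pattern_unique {p q : String × Int} (hp : p ∈ numberWords) (hq : q ∈ numberWords)
    {t : List Char} (h1 : p.1.toList <+: t) (h2 : q.1.toList <+: t) : p = q :=
  (List.prefix_or_prefix_of_prefix h1 h2).elim
    (fun h => words_prefix_unique p hp q hq h)
    (fun h => (words_prefix_unique q hq p hp h).symm)

theorem findSome?_unique {α β : Type} {l : List α} {f : α → Option β} {p : α} {v : β}
    (hp : p ∈ l) (hv : f p = some v) (hu : ∀ q ∈ l, (f q).isSome → q = p) :
    l.findSome? f = some v := by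
  induction l with
  | nil => cases hp
  | cons a t ih =>
    rcases List.mem_cons.mp hp with rfl | hpt
    · simp [List.findSome?, hv]
    · cases ha : f a with
      | some w =>
        have : a = p := hu a (List.mem_cons_self) (by simp [ha])
        subst this
        have hw : w = v := by rw [ha] at hv; injection hv
        subst hw
        simp [List.findSome?, ha]
      | none =>
        simp [List.findSome?, ha]
        exact ih hpt (fun q hq hs => hu q (List.mem_cons_of_mem a hq) hs)

theorem matchAt_of_prefix {p : String × Int} (hp : p ∈ numberWords) {t : List Char}
    (h : p.1.toList <+: t) : matchAt t = some p.2 := by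
  apply findSome?_unique hp
  · simp [List.isPrefixOf_iff_prefix, h]
  · intro q hq hs
    by_cases hpre : q.1.toList.isPrefixOf t
    · exact pattern_unique hq hp (List.isPrefixOf_iff_prefix.mp hpre) h
    · simp [hpre] at hs

theorem matchAt_some {t : List Char} {v : Int} (h : matchAt t = some v) :
    ∃ p ∈ numberWords, p.1.toList <+: t ∧ p.2 = v := by
  obtain ⟨p, hp, hfp⟩ := List.exists_of_findSome?_eq_some h
  by_cases hpre : p.1.toList.isPrefixOf t
  · exact ⟨p, hp, List.isPrefixOf_iff_prefix.mp hpre, by simpa [hpre] using hfp⟩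
  · simp [hpre] at hfp

-- the list of numbers matched at the successive positions of cs, in order
def hitsL : List Char → List Int
  | [] => []
  | c :: rest =>
      match matchAt (c :: rest) with
      | some v => v :: hitsL rest
      | none => hitsL rest

theorem hitsL_nil_all_none {cs : List Char} (h : hitsL cs = []) :
    ∀ i, matchAt (cs.drop i) = none := by
  induction cs with
  | nil => intro i; simpa using matchAt_nil
  | cons c rest ih =>
    intro i
    unfold hitsL at h
    cases hm : matchAt (c :: rest) with
    | some v => rw [hm] at h; cases h
    | none =>
      rw [hm] at h
      cases i with
      | zero => simpa using hm
      | succ j => simpa using ih h j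

theorem hitsL_head {cs : List Char} {v : Int} {vs : List Int} (h : hitsL cs = v :: vs) :
    ∃ i, matchAt (cs.drop i) = some v ∧ ∀ j < i, matchAt (cs.drop j) = none := by
  induction cs generalizing v vs with
  | nil => cases h
  | cons c rest ih =>
    unfold hitsL at h
    cases hm : matchAt (c :: rest) with
    | some w =>
      rw [hm] at h
      injection h with h1 h2
      subst h1
      exact ⟨0, by simpa using hm, by omega⟩
    | none =>
      rw [hm] at h
      obtain ⟨i, h1, h2⟩ := ih h
      refine ⟨i + 1, by simpa using h1, ?_⟩
      intro j hj
      cases j with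
      | zero => simpa using hm
      | succ k => simpa using h2 k (by omega)

theorem hitsL_last {cs : List Char} {v : Int} {vs : List Int} (h : hitsL cs = v :: vs) :
    ∃ i, matchAt (cs.drop i) = some ((v :: vs).getLast?.getD 0) ∧
      ∀ j, i < j → matchAt (cs.drop j) = none := by
  induction cs generalizing v vs with
  | nil => cases h
  | cons c rest ih =>
    unfold hitsL at h
    cases hm : matchAt (c :: rest) with
    | some w =>
      rw [hm] at h
      injection h with h1 h2
      subst h1; subst h2
      cases hr : hitsL rest with
      | nil =>
        refine ⟨0, by simpa using hm, ?_⟩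
        intro j hj
        cases j with
        | zero => omega
        | succ k => simpa using hitsL_nil_all_none hr k
      | cons v' vs' =>
        obtain ⟨i, h1, h2⟩ := ih hr
        refine ⟨i + 1, ?_, ?_⟩
        · simpa [List.getLast?_cons_cons] using h1
        · intro j hj
          cases j with
          | zero => omega
          | succ k => simpa using h2 k (by omega)
    | none =>
      rw [hm] at h
      obtain ⟨i, h1, h2⟩ := ih h
      refine ⟨i + 1, by simpa using h1, ?_⟩
      intro j hj
      cases j with
      | zero => omega
      | succ k => simpa using h2 k (by omega)

theorem scanB_spec (cs : List Char) (f? l? : Option Int) :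
    scanB cs f? l? =
      match hitsL cs with
      | [] => match f?, l? with
              | some f, some l => some (f, l)
              | _, _ => none
      | v :: vs => some (f?.getD v, (v :: vs).getLast?.getD 0) := by
  induction cs generalizing f? l? with
  | nil => simp [scanB, hitsL]
  | cons c rest ih =>
    unfold scanB hitsL
    cases hm : matchAt (c :: rest) with
    | some v =>
      dsimp only
      rw [ih (some (f?.getD v)) (some v)]
      cases hr : hitsL rest with
      | nil => simp
      | cons v' vs' => simp [List.getLast?_cons_cons]
    | none => dsimp only; exact ih f? l?

-- find/rfind characterisations
theorem find_le_of_prefix {cs sub : List Char} {i : Nat} (h : sub <+: cs.drop i) :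
    PySem.Chars.find cs sub ≤ i := by
  have hinf : sub <:+: cs := h.isInfix.trans (List.drop_suffix i cs).isInfix
  have h0 : 0 ≤ PySem.Chars.find cs sub := (PySem.Chars.find_nonneg_iff cs sub).mpr hinf
  obtain ⟨-, hmin⟩ := PySem.Chars.find_spec h0
  by_contra hlt
  exact hmin i (by omega) h

theorem rfind_go_cases (s sub : List Char) (j : Nat) :
    (PySem.Chars.rfind.go s sub j = -1 ∧ ∀ i ≤ j, ¬ sub <+: s.drop i) ∨
    (∃ k : Nat, k ≤ j ∧ PySem.Chars.rfind.go s sub j = k ∧ sub <+: s.drop k ∧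
      ∀ i, k < i → i ≤ j → ¬ sub <+: s.drop i) := by
  induction j with
  | zero =>
    by_cases h : sub.isPrefixOf s
    · right
      exact ⟨0, le_refl 0, by simp [PySem.Chars.rfind.go, h],
        by simpa using List.isPrefixOf_iff_prefix.mp h, by omega⟩
    · left
      constructor
      · simp [PySem.Chars.rfind.go, h]
      · intro i hi
        interval_cases i
        simpa using fun hp => h (List.isPrefixOf_iff_prefix.mpr hp)
  | succ j ih =>
    by_cases h : sub.isPrefixOf (s.drop (j + 1))
    · right
      refine ⟨j + 1, le_refl _, ?_, List.isPrefixOf_iff_prefix.mp h, by omega⟩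
      simp [PySem.Chars.rfind.go, h]
    · have hnp : ¬ sub <+: s.drop (j + 1) := fun hp => h (List.isPrefixOf_iff_prefix.mpr hp)
      have hgo : PySem.Chars.rfind.go s sub (j + 1) = PySem.Chars.rfind.go s sub j := by
        simp [PySem.Chars.rfind.go, h]
      rcases ih with ⟨h1, h2⟩ | ⟨k, hk, h1, h2, h3⟩
      · left
        refine ⟨by rw [hgo, h1], ?_⟩
        intro i hi
        rcases Nat.lt_or_ge i (j + 1) with hlt | hge
        · exact h2 i (by omega)
        · have : i = j + 1 := by omega
          subst this; exact hnp
      · right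
        refine ⟨k, by omega, by rw [hgo, h1], h2, ?_⟩
        intro i hik hi
        rcases Nat.lt_or_ge i (j + 1) with hlt | hge
        · exact h3 i hik (by omega)
        · have : i = j + 1 := by omega
          subst this; exact hnp

theorem rfind_cases (s sub : List Char) (hs : sub ≠ []) :
    (PySem.Chars.rfind s sub = -1 ∧ ∀ i, ¬ sub <+: s.drop i) ∨
    (∃ k : Nat, PySem.Chars.rfind s sub = k ∧ sub <+: s.drop k ∧
      ∀ i, k < i → ¬ sub <+: s.drop i) := by
  have hout : ∀ i, s.length < i → ¬ sub <+: s.drop i := by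
    intro i hi hp
    have : s.drop i = [] := List.drop_eq_nil_iff.mpr (by omega)
    rw [this] at hp
    exact hs (List.prefix_nil.mp hp)
  rcases rfind_go_cases s sub s.length with ⟨h1, h2⟩ | ⟨k, hk, h1, h2, h3⟩
  · left
    refine ⟨h1, fun i hp => ?_⟩
    rcases Nat.lt_or_ge s.length i with hlt | hle
    · exact hout i hlt hp
    · exact h2 i hle hp
  · right
    refine ⟨k, h1, h2, fun i hik hp => ?_⟩
    rcases Nat.lt_or_ge s.length i with hlt | hle
    · exact hout i hlt hp
    · exact h3 i hik hle hp

theorem concat_digits (a b : Int) (ha1 : 1 ≤ a) (ha9 : a ≤ 9) (hb1 : 1 ≤ b) (hb9 : b ≤ 9) :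
    (PySem.Int.ofStr? (PySem.Int.toStr a ++ PySem.Int.toStr b)).getD 0 = a * 10 + b := by
  interval_cases a <;> interval_cases b <;> decide

-- the per-line equivalence
theorem lineA_eq_lineB (s : String) (h : hitsL s.toList ≠ []) :
    part2LineA s = part2LineB s := by
  obtain ⟨v, vs, hh⟩ : ∃ v vs, hitsL s.toList = v :: vs := by
    cases hn : hitsL s.toList with
    | nil => exact absurd hn h
    | cons v vs => exact ⟨v, vs, rfl⟩
  -- B's value
  have hB : part2LineB s = v * 10 + (v :: vs).getLast?.getD 0 := by
    unfold part2LineB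
    rw [scanB_spec, hh]
    simp
  -- first hit
  obtain ⟨i₀, hm₀, hmin₀⟩ := hitsL_head hh
  obtain ⟨p₀, hp₀, hpre₀, hval₀⟩ := matchAt_some hm₀
  -- last hit
  obtain ⟨i₁, hm₁, hmax₁⟩ := hitsL_last hh
  obtain ⟨p₁, hp₁, hpre₁, hval₁⟩ := matchAt_some hm₁
  -- A's min side
  have hfind₀ : PySem.Chars.find s.toList p₀.1.toList ≠ -1 :=
    (PySem.Chars.find_ne_neg_one_iff s.toList p₀.1.toList).mpr
      (hpre₀.isInfix.trans (List.drop_suffix i₀ s.toList).isInfix)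
  have hmem₀ : (p₀.1, PySem.Str.find s p₀.1) ∈
      (numberWords.map (fun p => (p.1, PySem.Str.find s p.1))).filter (fun kv => kv.2 != -1) := by
    refine List.mem_filter.mpr ⟨List.mem_map.mpr ⟨p₀, hp₀, rfl⟩, ?_⟩
    simpa [PySem.Str.find_eq] using hfind₀
  rcases hmn : PySem.List.min?
      ((numberWords.map (fun p => (p.1, PySem.Str.find s p.1))).filter (fun kv => kv.2 != -1))
      (fun kv => kv.2) with _ | mn
  · rw [PySem.List.min?_eq_none_iff] at hmn
    rw [hmn] at hmem₀
    cases hmem₀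
  rcases hmx : PySem.List.max? (numberWords.map (fun p => (p.1, PySem.Str.rfind s p.1)))
      (fun kv => kv.2) with _ | mx
  · rw [PySem.List.max?_eq_none_iff] at hmx
    simp [numberWords] at hmx
  -- identify mn
  obtain ⟨hmnmem, hmnne⟩ := List.mem_filter.mp (PySem.List.min?_mem hmn)
  obtain ⟨q, hq, hqeq⟩ := List.mem_map.mp hmnmem
  have hqne : PySem.Chars.find s.toList q.1.toList ≠ -1 := by
    have := hmnne
    rw [← hqeq] at this
    simpa [PySem.Str.find_eq] using this
  have hq0 : 0 ≤ PySem.Chars.find s.toList q.1.toList :=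
    (PySem.Chars.find_nonneg_iff s.toList q.1.toList).mpr
      (by
        by_contra hni
        exact hqne ((PySem.Chars.find_eq_neg_one_iff s.toList q.1.toList).mpr hni))
  obtain ⟨hqpre, -⟩ := PySem.Chars.find_spec hq0
  have hqi₀ : i₀ ≤ (PySem.Chars.find s.toList q.1.toList).toNat := by
    by_contra hlt
    have := hmin₀ (PySem.Chars.find s.toList q.1.toList).toNat (by omega)
    rw [matchAt_of_prefix hq hqpre] at this
    cases this
  have hle1 : PySem.Chars.find s.toList q.1.toList ≤ PySem.Chars.find s.toList p₀.1.toList := by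
    have := PySem.List.min?_isMin hmn _ hmem₀
    rw [← hqeq] at this
    simpa [PySem.Str.find_eq] using this
  have hle2 : PySem.Chars.find s.toList p₀.1.toList ≤ (i₀ : Int) := find_le_of_prefix hpre₀
  have hfq : (PySem.Chars.find s.toList q.1.toList).toNat = i₀ := by omega
  have hqv : q.2 = v := by
    have := matchAt_of_prefix hq (hfq ▸ hqpre)
    rw [hm₀] at this
    exact (Option.some.inj this).symm
  -- identify mx
  obtain ⟨r, hr, hreq⟩ := List.mem_map.mp (PySem.List.max?_mem hmx)
  have hrf₁ : PySem.Chars.rfind s.toList p₁.1.toList = (i₁ : Int) := by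
    rcases rfind_cases s.toList p₁.1.toList (words_ne_nil p₁ hp₁) with ⟨-, hn⟩ | ⟨k, h1, h2, h3⟩
    · exact absurd hpre₁ (hn i₁)
    · have hki : k ≤ i₁ := by
        by_contra hlt
        have := hmax₁ k (by omega)
        rw [matchAt_of_prefix hp₁ h2] at this
        cases this
      have hik : i₁ ≤ k := by
        by_contra hlt
        exact h3 i₁ (by omega) hpre₁
      have : k = i₁ := by omega
      rw [h1, this]
  have hrge : (i₁ : Int) ≤ PySem.Chars.rfind s.toList r.1.toList := by
    have hmem₁ : (p₁.1, PySem.Str.rfind s p₁.1) ∈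
        numberWords.map (fun p => (p.1, PySem.Str.rfind s p.1)) :=
      List.mem_map.mpr ⟨p₁, hp₁, rfl⟩
    have := PySem.List.max?_isMax hmx _ hmem₁
    rw [← hreq] at this
    simpa [PySem.Str.rfind_eq, hrf₁] using this
  have hrv : r.2 = (v :: vs).getLast?.getD 0 := by
    rcases rfind_cases s.toList r.1.toList (words_ne_nil r hr) with ⟨h1, -⟩ | ⟨k, h1, h2, h3⟩
    · rw [h1] at hrge; omega
    · have hki : k ≤ i₁ := by
        by_contra hlt
        have := hmax₁ k (by omega)
        rw [matchAt_of_prefix hr h2] at this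
        cases this
      have hik : i₁ ≤ k := by rw [h1] at hrge; omega
      have hk : k = i₁ := by omega
      have := matchAt_of_prefix hr (hk ▸ h2)
      rw [hm₁] at this
      exact (Option.some.inj this).symm
  -- assemble A's value
  have hmn1 : mn.1 = q.1 := by rw [← hqeq]
  have hmx1 : mx.1 = r.1 := by rw [← hreq]
  simp only [part2LineA]
  rw [hmn, hmx]
  simp only [hmn1, hmx1, words_lookup q hq, words_lookup r hr, Option.getD_some]
  rw [hB, concat_digits q.2 r.2 (words_val_range q hq).1 (words_val_range q hq).2
    (words_val_range r hr).1 (words_val_range r hr).2, hqv, hrv]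

theorem hitsL_ne_nil_of_isIn {s : String}
    (h : numberWords.any (fun q => PySem.Str.isIn q.1 s) = true) :
    hitsL s.toList ≠ [] := by
  obtain ⟨q, hq, hin⟩ := List.any_eq_true.mp h
  rw [PySem.Str.isIn_eq] at hin
  obtain ⟨j, hj⟩ := (PySem.Chars.exists_prefix_drop_iff_isIn q.1.toList s.toList).mpr hin
  intro hnil
  have := hitsL_nil_all_none hnil j
  rw [matchAt_of_prefix hq hj] at this
  cases this

-- ===== VERDICT (by name: the statement is the Claim_ definition above) =====
theorem part2_spec : Claim_equal_part2 := by
  intro rounds _ hpre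
  unfold Spec_part2 part2 part2_alt
  apply PySem.List.foldl_congr_mem
  intro acc s hs
  have hs' : s ∈ rounds.map Prod.fst := by
    rw [PySem.List.dedup] at hs
    exact (PySem.Set.mem_ofList (rounds.map Prod.fst) s).mp hs
  obtain ⟨p, hp, hps⟩ := List.mem_map.mp hs'
  have hall := List.all_eq_true.mp hpre p hp
  have hany : numberWords.any (fun q => PySem.Str.isIn q.1 s) = true := by
    rw [← hps]; simpa using hall
  rw [lineA_eq_lineB s (hitsL_ne_nil_of_isIn hany)]
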